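-- pv_equiv track=rewrite | github.com/imtiaz-rahi/Py-CheckiO | Ice Base/Can You Pass?/clear-1.py | can_pass
-- ===== SOURCE A (Python) =====
-- from itertools import chain, product, starmap
--
-- def can_pass(matrix, first, second):
--     digit = matrix[first[0]][first[1]]
--     cells = product(range(len(matrix)), range(len(matrix[0])))
--     living = {(y, x) for y, x in cells if matrix[y][x] == digit}
--
--     neighbors = lambda y, x: ((y - 1, x), (y + 1, x), (y, x - 1), (y, x + 1))
--     tips = {first}
--     while tips:
--         tips = set(chain.from_iterable(starmap(neighbors, tips))) & living
--         living -= tips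
--         if second in tips: return True
--
--     return False
-- ===== SOURCE B (Python) =====
-- def can_pass(matrix, first, second):
--     digit = matrix[first[0]][first[1]]
--     rows, cols = len(matrix), len(matrix[0])
--     living = {(y, x) for y in range(rows) for x in range(cols) if matrix[y][x] == digit}
--     stack = [first]
--     visited = set()
--     while stack:
--         y, x = stack.pop()
--         for nb in ((y - 1, x), (y + 1, x), (y, x - 1), (y, x + 1)):
--             if nb in living:
--                 if nb == second:
--                     return True
--                 if nb not in visited:
--                     visited.add(nb)
--                     stack.append(nb)
--     return False
-- ===== Notes on version B (the rewrite author's own statement) =====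
-- stated objective: alternative
-- what changed: Replaced A's whole-frontier level-by-level BFS (rebuilding the frontier as a set intersection and shrinking the living set each round) by a depth-first search with an explicit stack and a visited set, testing for the target at discovery time; the start cell is not marked visited, which naturally preserves the reachable-in-at-least-one-step semantics.
import Mathlib
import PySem

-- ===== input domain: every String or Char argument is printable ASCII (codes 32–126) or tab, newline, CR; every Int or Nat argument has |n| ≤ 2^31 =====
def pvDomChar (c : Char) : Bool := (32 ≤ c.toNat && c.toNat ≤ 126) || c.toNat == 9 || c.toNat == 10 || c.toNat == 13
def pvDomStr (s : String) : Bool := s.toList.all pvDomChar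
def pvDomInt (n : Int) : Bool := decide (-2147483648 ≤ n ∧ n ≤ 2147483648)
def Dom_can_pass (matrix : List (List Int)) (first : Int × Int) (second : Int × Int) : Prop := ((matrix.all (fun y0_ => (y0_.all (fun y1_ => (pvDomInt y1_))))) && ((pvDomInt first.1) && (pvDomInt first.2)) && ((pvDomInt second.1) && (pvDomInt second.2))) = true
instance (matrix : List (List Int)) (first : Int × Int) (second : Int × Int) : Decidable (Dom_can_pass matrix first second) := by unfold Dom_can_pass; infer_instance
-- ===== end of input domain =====

-- B replaces A's whole-frontier BFS by a stack-based DFS with a visited set (same return value; no mutation of arguments).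

-- ===== PORT A =====
-- helpers shared by both ports: both Pythons compute `digit = matrix[first[0]][first[1]]`
-- and the same-digit set `living` by the same comprehension.
-- matrix[first[0]][first[1]]; the .getD defaults are reached only outside Pre_can_pass (IndexError in Python)
def pvDigit (matrix : List (List Int)) (first : Int × Int) : Int :=
  (PySem.List.pyGet? ((PySem.List.pyGet? matrix first.1).getD []) first.2).getD 0

-- the four orthogonal neighbours (A's `neighbors` lambda / B's tuple)
def pvNbrs (c : Int × Int) : List (Int × Int) :=
  [(c.1 - 1, c.2), (c.1 + 1, c.2), (c.1, c.2 - 1), (c.1, c.2 + 1)]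

-- {(y, x) for (y, x) in product(range(rows), range(cols)) if matrix[y][x] == digit}
-- (inside Pre_can_pass every pyGet? here is some; a missing cell just fails the == test)
def pvLiving (matrix : List (List Int)) (digit : Int) : PySem.Set (Int × Int) :=
  PySem.Set.ofList
    (((PySem.List.pyRange 0 matrix.length 1).flatMap (fun y =>
        (PySem.List.pyRange 0 (matrix.headD []).length 1).map (fun x => (y, x)))).filter
      (fun c => PySem.List.pyGet? (PySem.List.pyGetD matrix c.1 []) c.2 == some digit))

-- A's while loop: tips = neighbours(tips) & living; living -= tips; stop when second found / tips empty
def pvLoopA (second : Int × Int) (tips living : PySem.Set (Int × Int)) : Bool :=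
  if tips = [] then false
  else
    if second ∈ PySem.Set.inter (PySem.Set.ofList (tips.flatMap pvNbrs)) living then true
    else
      pvLoopA second (PySem.Set.inter (PySem.Set.ofList (tips.flatMap pvNbrs)) living)
        (PySem.Set.diff living (PySem.Set.inter (PySem.Set.ofList (tips.flatMap pvNbrs)) living))
termination_by 2 * living.length + (if tips = [] then 0 else 1)
decreasing_by
  rename_i h1 _h2
  have hatt : List.flatMap (fun x => pvNbrs x.1) tips.attach = tips.flatMap pvNbrs := by simp
  rw [hatt]
  simp only [if_neg h1]
  by_cases h3 : PySem.Set.inter (PySem.Set.ofList (tips.flatMap pvNbrs)) living = []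
  · simp only [if_pos h3, PySem.Set.diff]
    have := List.length_filter_le (fun x => !(PySem.Set.inter (PySem.Set.ofList (tips.flatMap pvNbrs)) living).contains x) living
    omega
  · simp only [if_neg h3, PySem.Set.diff]
    obtain ⟨x, hx⟩ := List.exists_mem_of_ne_nil _ h3
    have hxl : x ∈ living := ((PySem.Set.mem_inter _ _ _).mp hx).2
    have : (List.filter (fun x => !(PySem.Set.inter (PySem.Set.ofList (tips.flatMap pvNbrs)) living).contains x) living).length < living.length := by
      rw [List.length_filter_lt_length_iff_exists]
      exact ⟨x, hxl, by simp [hx]⟩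
    omega

def can_pass (matrix : List (List Int)) (first : Int × Int) (second : Int × Int) : Bool :=
  pvLoopA second (PySem.Set.ofList [first]) (pvLiving matrix (pvDigit matrix first))

-- ===== PORT B =====
-- the inner `for nb in neighbours:` loop of Source B; none = `return True`,
-- some (stack', visited') = the state after the four neighbours were processed
def pvExplore (living : PySem.Set (Int × Int)) (second : Int × Int) :
    List (Int × Int) → List (Int × Int) → PySem.Set (Int × Int) →
    Option (List (Int × Int) × PySem.Set (Int × Int))
  | [], stack, visited => some (stack, visited)
  | nb :: rest, stack, visited =>
    if nb ∈ living then
      if nb = second then none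
      else if nb ∈ visited then pvExplore living second rest stack visited
      else pvExplore living second rest (nb :: stack) (PySem.Set.add visited nb)
    else pvExplore living second rest stack visited

-- termination measure for the DFS: number of living cells not yet visited
def pvFresh (living visited : List (Int × Int)) : Nat :=
  (living.filter (fun x => decide (x ∉ visited))).length

-- pvExplore_term: everything pvLoopB's termination needs about one neighbour pass:
-- the visited set only grows, and if it grows, strictly fewer living cells stay unvisited
theorem pvExplore_term (living : PySem.Set (Int × Int)) (second : Int × Int) :
    ∀ nbs stack visited s' v', pvExplore living second nbs stack visited = some (s', v') →
      (∀ x ∈ visited, x ∈ v') ∧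
      ((s' = stack ∧ v' = visited) ∨ pvFresh living v' < pvFresh living visited) := by
  have mono : ∀ (l v v' : List (Int × Int)), (∀ x ∈ v, x ∈ v') → pvFresh l v' ≤ pvFresh l v := by
    intro l v v' h
    simp only [pvFresh, ← List.countP_eq_length_filter]
    refine List.countP_mono_left (fun x _ hx => ?_)
    simp only [decide_eq_true_eq] at hx ⊢
    exact fun hxv => hx (h x hxv)
  have strict : ∀ (l v v' : List (Int × Int)) (x : Int × Int), (∀ y ∈ v, y ∈ v') →
      x ∈ l → x ∉ v → x ∈ v' → pvFresh l v' < pvFresh l v := by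
    intro l v v' x h hxl hxv hxv'
    obtain ⟨sl, tl, rfl⟩ := List.append_of_mem hxl
    have h1 := mono sl v v' h
    have h2 := mono tl v v' h
    simp only [pvFresh, List.filter_append, List.filter_cons, List.length_append] at h1 h2 ⊢
    simp only [hxv, hxv', not_true_eq_false, not_false_eq_true, decide_true, decide_false,
      Bool.false_eq_true, if_true, if_false, List.length_cons]
    omega
  intro nbs
  induction nbs with
  | nil =>
    intro stack visited s' v' h
    simp only [pvExplore, Option.some.injEq, Prod.mk.injEq] at h
    obtain ⟨rfl, rfl⟩ := h
    exact ⟨fun x hx => hx, Or.inl ⟨rfl, rfl⟩⟩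
  | cons nb rest ih =>
    intro stack visited s' v' h
    simp only [pvExplore] at h
    split_ifs at h with h1 h2 h3
    · exact ih _ _ _ _ h
    · obtain ⟨hsub, hd⟩ := ih _ _ _ _ h
      have hadd : ∀ y ∈ visited, y ∈ PySem.Set.add visited nb :=
        fun y hy => (PySem.Set.mem_add _ _ _).mpr (Or.inl hy)
      have hmem : nb ∈ PySem.Set.add visited nb := (PySem.Set.mem_add _ _ _).mpr (Or.inr rfl)
      have hstep : pvFresh living (PySem.Set.add visited nb) < pvFresh living visited :=
        strict living visited _ nb hadd h1 h3 hmem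
      refine ⟨fun x hx => hsub x (hadd x hx), Or.inr ?_⟩
      rcases hd with ⟨_, hv⟩ | hlt
      · exact hv ▸ hstep
      · exact hlt.trans hstep
    · exact ih _ _ _ _ h

-- Source B's while loop: pop a cell, process its four neighbours, repeat
def pvLoopB (living : PySem.Set (Int × Int)) (second : Int × Int)
    (stack : List (Int × Int)) (visited : PySem.Set (Int × Int)) : Bool :=
  match stack with
  | [] => false
  | c :: rest =>
    match h : pvExplore living second (pvNbrs c) rest visited with
    | none => true
    | some (s', v') => pvLoopB living second s' v'
termination_by (pvFresh living visited, stack.length)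
decreasing_by
  rcases (pvExplore_term living second (pvNbrs c) rest visited s' v' h).2 with ⟨hs, hv⟩ | hlt
  · subst hs hv
    exact Prod.Lex.right _ (Nat.lt_succ_self _)
  · exact Prod.Lex.left _ _ hlt

def can_pass_alt (matrix : List (List Int)) (first : Int × Int) (second : Int × Int) : Bool :=
  pvLoopB (pvLiving matrix (pvDigit matrix first)) second [first] PySem.Set.empty

-- ===== PRECONDITION & SPEC =====
-- Pre_can_pass = exactly the inputs on which Python A returns: the start indices are valid
-- (Python indexing, negative allowed) and no row is shorter than row 0 (else matrix[y][x]
-- raises IndexError while building `living`).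
def Pre_can_pass (matrix : List (List Int)) (first : Int × Int) (second : Int × Int) : Prop :=
  PySem.Raise.InRange matrix.length first.1 ∧
  PySem.Raise.InRange ((PySem.List.pyGet? matrix first.1).getD []).length first.2 ∧
  ∀ row ∈ matrix, (matrix.headD []).length ≤ row.length
instance (matrix : List (List Int)) (first : Int × Int) (second : Int × Int) : Decidable (Pre_can_pass matrix first second) := by unfold Pre_can_pass; infer_instance

def pvWitness_can_pass : List (List Int) × (Int × Int) × (Int × Int) :=
  ([[1, 0], [1, 1]], (0, 0), (1, 1))

def Spec_can_pass (matrix : List (List Int)) (first : Int × Int) (second : Int × Int) (out : Bool) : Prop := out = can_pass_alt matrix first second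
instance (matrix : List (List Int)) (first : Int × Int) (second : Int × Int) (out : Bool) : Decidable (Spec_can_pass matrix first second out) := by unfold Spec_can_pass; infer_instance

-- ===== CLAIM (what is proved, stated in full; the proofs are below) =====
def Claim_equal_can_pass : Prop := ∀ (matrix : List (List Int)) (first : Int × Int) (second : Int × Int), Dom_can_pass matrix first second → Pre_can_pass matrix first second → Spec_can_pass matrix first second (can_pass matrix first second)

-- ===== LEMMAS AND PROOFS =====

-- reachability in ≥ 1 step from `a` through cells of `living` (the value both loops decide)
inductive pvReach (living : List (Int × Int)) (a : Int × Int) : (Int × Int) → Prop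
  | base (b : Int × Int) : b ∈ pvNbrs a → b ∈ living → pvReach living a b
  | cons (b c : Int × Int) : pvReach living a b → c ∈ pvNbrs b → c ∈ living → pvReach living a c

-- ---- A: frontier BFS decides pvReach ----

theorem pvStepReach (tips living : List (Int × Int)) (t c : Int × Int) (ht : t ∈ tips)
    (hr : pvReach living t c) :
    c ∈ PySem.Set.inter (PySem.Set.ofList (tips.flatMap pvNbrs)) living ∨
      ∃ t' ∈ PySem.Set.inter (PySem.Set.ofList (tips.flatMap pvNbrs)) living,
        pvReach (PySem.Set.diff living (PySem.Set.inter (PySem.Set.ofList (tips.flatMap pvNbrs)) living)) t' c := by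
  induction hr with
  | base b hadj hliv =>
    exact Or.inl ((PySem.Set.mem_inter _ _ _).mpr
      ⟨(PySem.Set.mem_ofList _ _).mpr (List.mem_flatMap.mpr ⟨t, ht, hadj⟩), hliv⟩)
  | cons b c hrb hadj hliv ih =>
    by_cases hc : c ∈ PySem.Set.inter (PySem.Set.ofList (tips.flatMap pvNbrs)) living
    · exact Or.inl hc
    · have hcl : c ∈ PySem.Set.diff living (PySem.Set.inter (PySem.Set.ofList (tips.flatMap pvNbrs)) living) :=
        (PySem.Set.mem_diff _ _ _).mpr ⟨hliv, hc⟩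
      right
      rcases ih with hb | ⟨t', ht', hr'⟩
      · exact ⟨b, hb, pvReach.base c hadj hcl⟩
      · exact ⟨t', ht', pvReach.cons b c hr' hadj hcl⟩

theorem pvLoopA_true (second first : Int × Int) (living0 : List (Int × Int)) :
    ∀ tips living, pvLoopA second tips living = true →
      (∀ x ∈ living, x ∈ living0) →
      (∀ t ∈ tips, t = first ∨ pvReach living0 first t) →
      pvReach living0 first second := by
  intro tips living
  fun_induction pvLoopA second tips living with
  | case1 living => intro h; simp at h
  | case2 tips living h1 h2 =>
    intro _ hsub hinv
    obtain ⟨hn, hl⟩ := (PySem.Set.mem_inter _ _ _).mp h2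
    obtain ⟨t, ht, hadj⟩ := List.mem_flatMap.mp ((PySem.Set.mem_ofList _ _).mp hn)
    rcases hinv t ht with rfl | hr
    · exact pvReach.base second hadj (hsub second hl)
    · exact pvReach.cons t second hr hadj (hsub second hl)
  | case3 tips living h1 h2 ih =>
    simp only [List.flatMap_subtype, List.unattach_attach] at ih
    intro htrue hsub hinv
    refine ih htrue (fun x hx => hsub x ((PySem.Set.mem_diff _ _ _).mp hx).1) (fun t' ht' => ?_)
    obtain ⟨hn, hl⟩ := (PySem.Set.mem_inter _ _ _).mp ht'
    obtain ⟨t, ht, hadj⟩ := List.mem_flatMap.mp ((PySem.Set.mem_ofList _ _).mp hn)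
    rcases hinv t ht with rfl | hr
    · exact Or.inr (pvReach.base t' hadj (hsub t' hl))
    · exact Or.inr (pvReach.cons t t' hr hadj (hsub t' hl))

theorem pvLoopA_false (second : Int × Int) :
    ∀ tips living, pvLoopA second tips living = false →
      ∀ t ∈ tips, ¬ pvReach living t second := by
  intro tips living
  fun_induction pvLoopA second tips living with
  | case1 living => intro _ t ht; cases ht
  | case2 tips living h1 h2 => intro h; simp at h
  | case3 tips living h1 h2 ih =>
    simp only [List.flatMap_subtype, List.unattach_attach] at ih
    intro hfalse t ht hr
    rcases pvStepReach tips living t second ht hr with hsec | ⟨t', ht', hr'⟩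
    · exact h2 hsec
    · exact ih hfalse t' ht' hr'

theorem canA_iff (matrix : List (List Int)) (first second : Int × Int) :
    can_pass matrix first second = true ↔
      pvReach (pvLiving matrix (pvDigit matrix first)) first second := by
  unfold can_pass
  constructor
  · intro h
    exact pvLoopA_true second first _ _ _ h (fun x hx => hx)
      (fun t ht => Or.inl (List.mem_singleton.mp ((PySem.Set.mem_ofList _ _).mp ht)))
  · intro hr
    cases hb : pvLoopA second (PySem.Set.ofList [first]) (pvLiving matrix (pvDigit matrix first)) with
    | false =>
      exact absurd hr (pvLoopA_false second _ _ hb first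
        ((PySem.Set.mem_ofList _ _).mpr (List.mem_singleton_self first)))
    | true => rfl

-- ---- B: DFS decides pvReach ----

theorem pvExplore_some_facts (living : PySem.Set (Int × Int)) (second : Int × Int) :
    ∀ nbs stack visited s' v', pvExplore living second nbs stack visited = some (s', v') →
      (∀ x ∈ stack, x ∈ s') ∧
      (∀ x ∈ s', x ∈ stack ∨ (x ∈ nbs ∧ x ∈ living)) ∧
      (∀ x ∈ v', x ∈ visited ∨ x ∈ s') ∧
      (∀ nb ∈ nbs, nb ∈ living → nb ≠ second ∧ nb ∈ v') := by
  intro nbs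
  induction nbs with
  | nil =>
    intro stack visited s' v' h
    simp only [pvExplore, Option.some.injEq, Prod.mk.injEq] at h
    obtain ⟨rfl, rfl⟩ := h
    exact ⟨fun x hx => hx, fun x hx => Or.inl hx, fun x hx => Or.inl hx, by simp⟩
  | cons nb rest ih =>
    intro stack visited s' v' h
    simp only [pvExplore] at h
    split_ifs at h with h1 h2 h3
    · obtain ⟨L3, L4, L5, L7⟩ := ih _ _ _ _ h
      refine ⟨L3, fun x hx => (L4 x hx).imp id
        (fun hx2 => ⟨List.mem_cons_of_mem _ hx2.1, hx2.2⟩), L5, ?_⟩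
      intro m hm hml
      rcases List.mem_cons.mp hm with rfl | hmr
      · exact ⟨h2, (pvExplore_term living second rest _ _ _ _ h).1 m h3⟩
      · exact L7 m hmr hml
    · obtain ⟨L3, L4, L5, L7⟩ := ih _ _ _ _ h
      have hsub := (pvExplore_term living second rest _ _ _ _ h).1
      have hnbv : nb ∈ v' := hsub nb ((PySem.Set.mem_add _ _ _).mpr (Or.inr rfl))
      have hnbs : nb ∈ s' := L3 nb (List.mem_cons_self ..)
      refine ⟨fun x hx => L3 x (List.mem_cons_of_mem _ hx), fun x hx => ?_, fun x hx => ?_, ?_⟩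
      · rcases L4 x hx with hxs | ⟨hn, hl⟩
        · rcases List.mem_cons.mp hxs with rfl | hxs2
          · exact Or.inr ⟨List.mem_cons_self .., h1⟩
          · exact Or.inl hxs2
        · exact Or.inr ⟨List.mem_cons_of_mem _ hn, hl⟩
      · rcases L5 x hx with hxv | hxs
        · rcases (PySem.Set.mem_add _ _ _).mp hxv with hxv2 | rfl
          · exact Or.inl hxv2
          · exact Or.inr hnbs
        · exact Or.inr hxs
      · intro m hm hml
        rcases List.mem_cons.mp hm with rfl | hmr
        · exact ⟨h2, hnbv⟩
        · exact L7 m hmr hml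
    · obtain ⟨L3, L4, L5, L7⟩ := ih _ _ _ _ h
      refine ⟨L3, fun x hx => (L4 x hx).imp id
        (fun hx2 => ⟨List.mem_cons_of_mem _ hx2.1, hx2.2⟩), L5, ?_⟩
      intro m hm hml
      rcases List.mem_cons.mp hm with rfl | hmr
      · exact absurd hml h1
      · exact L7 m hmr hml

theorem pvExplore_none (living : PySem.Set (Int × Int)) (second : Int × Int) :
    ∀ nbs stack visited, pvExplore living second nbs stack visited = none →
      second ∈ nbs ∧ second ∈ living := by
  intro nbs
  induction nbs with
  | nil => intro stack visited h; simp [pvExplore] at h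
  | cons nb rest ih =>
    intro stack visited h
    simp only [pvExplore] at h
    split_ifs at h with h1 h2 h3
    · exact ⟨h2 ▸ List.mem_cons_self .., h2 ▸ h1⟩
    · obtain ⟨ha, hb⟩ := ih _ _ h; exact ⟨List.mem_cons_of_mem _ ha, hb⟩
    · obtain ⟨ha, hb⟩ := ih _ _ h; exact ⟨List.mem_cons_of_mem _ ha, hb⟩
    · obtain ⟨ha, hb⟩ := ih _ _ h; exact ⟨List.mem_cons_of_mem _ ha, hb⟩

theorem pvLoopB_true (living0 : List (Int × Int)) (second first : Int × Int) :
    ∀ stack visited, pvLoopB living0 second stack visited = true →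
      (∀ c ∈ stack, c = first ∨ pvReach living0 first c) →
      pvReach living0 first second := by
  intro stack visited
  fun_induction pvLoopB living0 second stack visited with
  | case1 visited => intro h; simp at h
  | case2 visited c rest h =>
    intro _ hinv
    obtain ⟨hn, hl⟩ := pvExplore_none living0 second (pvNbrs c) rest visited h
    rcases hinv c (List.mem_cons_self ..) with rfl | hr
    · exact pvReach.base second hn hl
    · exact pvReach.cons c second hr hn hl
  | case3 visited c rest s' v' h ih =>
    intro htrue hinv
    refine ih htrue (fun x hx => ?_)
    obtain ⟨_, L4, _, _⟩ := pvExplore_some_facts living0 second (pvNbrs c) rest visited s' v' h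
    rcases L4 x hx with hxr | ⟨hadj, hlv⟩
    · exact hinv x (List.mem_cons_of_mem _ hxr)
    · rcases hinv c (List.mem_cons_self ..) with rfl | hr
      · exact Or.inr (pvReach.base x hadj hlv)
      · exact Or.inr (pvReach.cons c x hr hadj hlv)

def pvGood (living0 : List (Int × Int)) (first second : Int × Int)
    (stack visited : List (Int × Int)) : Prop :=
  ∀ v, (v ∈ visited ∨ v = first) →
    v ∈ stack ∨ (∀ nb ∈ pvNbrs v, nb ∈ living0 → nb ≠ second ∧ nb ∈ visited)

theorem pvClosed (living0 : List (Int × Int)) (first second : Int × Int)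
    (visited : List (Int × Int))
    (h : ∀ v, (v ∈ visited ∨ v = first) → ∀ nb ∈ pvNbrs v, nb ∈ living0 → nb ≠ second ∧ nb ∈ visited) :
    ∀ c, pvReach living0 first c → c ∈ visited ∧ c ≠ second := by
  intro c hr
  induction hr with
  | base b hadj hliv =>
    have hb := h first (Or.inr rfl) b hadj hliv
    exact ⟨hb.2, hb.1⟩
  | cons b c hrb hadj hliv ih =>
    have hb := h b (Or.inl ih.1) c hadj hliv
    exact ⟨hb.2, hb.1⟩

theorem pvLoopB_false (living0 : List (Int × Int)) (second first : Int × Int) :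
    ∀ stack visited, pvLoopB living0 second stack visited = false →
      pvGood living0 first second stack visited →
      ¬ pvReach living0 first second := by
  intro stack visited
  fun_induction pvLoopB living0 second stack visited with
  | case1 visited =>
    intro _ hgood hr
    have hcl : ∀ v, (v ∈ visited ∨ v = first) →
        ∀ nb ∈ pvNbrs v, nb ∈ living0 → nb ≠ second ∧ nb ∈ visited := by
      intro v hv
      rcases hgood v hv with hvs | hc
      · cases hvs
      · exact hc
    exact (pvClosed living0 first second visited hcl second hr).2 rfl
  | case2 visited c rest h => intro hfalse; simp at hfalse
  | case3 visited c rest s' v' h ih =>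
    intro hfalse hgood
    refine ih hfalse ?_
    obtain ⟨L3, L4, L5, L7⟩ := pvExplore_some_facts living0 second (pvNbrs c) rest visited s' v' h
    have hsub := (pvExplore_term living0 second (pvNbrs c) rest visited s' v' h).1
    intro v hv
    rcases hv with hvv' | rfl
    · rcases L5 v hvv' with hvv | hvs
      · rcases hgood v (Or.inl hvv) with hvstack | hc
        · rcases List.mem_cons.mp hvstack with rfl | hvr
          · exact Or.inr (fun nb hn hl => L7 nb hn hl)
          · exact Or.inl (L3 v hvr)
        · exact Or.inr (fun nb hn hl => ⟨(hc nb hn hl).1, hsub nb (hc nb hn hl).2⟩)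
      · exact Or.inl hvs
    · rcases hgood v (Or.inr rfl) with hvstack | hc
      · rcases List.mem_cons.mp hvstack with heq | hvr
        · exact Or.inr (fun nb hn hl => L7 nb (heq ▸ hn) hl)
        · exact Or.inl (L3 v hvr)
      · exact Or.inr (fun nb hn hl => ⟨(hc nb hn hl).1, hsub nb (hc nb hn hl).2⟩)

theorem canB_iff (matrix : List (List Int)) (first second : Int × Int) :
    can_pass_alt matrix first second = true ↔
      pvReach (pvLiving matrix (pvDigit matrix first)) first second := by
  unfold can_pass_alt
  have hgood : pvGood (pvLiving matrix (pvDigit matrix first)) first second [first] PySem.Set.empty := by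
    unfold pvGood
    intro v hv
    rcases hv with hvv | rfl
    · cases hvv
    · exact Or.inl (List.mem_singleton_self v)
  constructor
  · intro h
    exact pvLoopB_true _ second first _ _ h (fun c hc => Or.inl (List.mem_singleton.mp hc))
  · intro hr
    cases hb : pvLoopB (pvLiving matrix (pvDigit matrix first)) second [first] PySem.Set.empty with
    | false => exact absurd hr (pvLoopB_false _ second first _ _ hb hgood)
    | true => rfl

-- ===== VERDICT (by name: the statement is the Claim_ definition above) =====
theorem can_pass_spec : Claim_equal_can_pass := by
  intro matrix first second _hdom _hpre
  unfold Spec_can_pass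
  exact Bool.eq_iff_iff.mpr ((canA_iff matrix first second).trans (canB_iff matrix first second).symm)
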